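-- pv_equiv track=rewrite | github.com/Rami-Ismael/HLT_HW5_WebScraping | UtilityFuncts.py | qid
-- ===== SOURCE A (Python) =====
-- def qid( word ):
--     ## Create qid
--     n = 10000
--     primes = []
--     for i in range( 2 , n+1 ):
--         for j in range(2, int(i ** 0.5) + 1):
--             if i%j ==0:
--                 break
--         else:
--             primes.append(i)
--     prim_freq = dict()
--     for x in word:
--         if  primes[ ord(x) - 97 ] in prim_freq.keys():
--             prim_freq[ primes[ ord(x) -97 ] ]  = prim_freq[ primes[ ord(x) -97 ]] +1
--         else:
--             prim_freq[ primes[ ord(x) -97 ]]= 1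
--     val = 0
--     for x  in prim_freq.items():
--         prime_val = x[0]
--         freq = x[1]
--         val   =  (   prime_val *freq)  + val
--     return val
-- ===== SOURCE B (Python) =====
-- def qid(word):
--     n = 10000
--     primes = [i for i in range(2, n + 1)
--               if i == 2 or (i % 2 and all(i % j for j in range(3, int(i ** 0.5) + 1, 2)))]
--     return sum(primes[ord(x) - 97] for x in word)
-- ===== Notes on version B (the rewrite author's own statement) =====
-- stated objective: simpler
-- what changed: B generates the primes by a direct comprehension that special-cases 2 and trial-divides only by odd candidates (step-2 range) instead of A's all-candidates loop with break, and drops A's frequency dict entirely, summing primes[ord(x)-97] directly over the word.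
import Mathlib
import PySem

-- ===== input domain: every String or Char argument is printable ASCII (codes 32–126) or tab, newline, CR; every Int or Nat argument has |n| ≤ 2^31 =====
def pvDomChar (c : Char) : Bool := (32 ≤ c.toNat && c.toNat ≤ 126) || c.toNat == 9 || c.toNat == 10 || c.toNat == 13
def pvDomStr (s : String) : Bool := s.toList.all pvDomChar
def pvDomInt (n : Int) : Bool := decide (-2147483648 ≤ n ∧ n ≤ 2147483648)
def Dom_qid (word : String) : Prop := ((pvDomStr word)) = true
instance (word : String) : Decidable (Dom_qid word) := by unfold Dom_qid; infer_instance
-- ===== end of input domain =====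

-- B drops A's frequency dict (summing primes[ord(x)-97] directly) and generates the primes by a
-- comprehension that special-cases 2 and trial-divides by odd candidates only; same return value.


-- ===== PORT A =====
-- int(i ** 0.5): exact integer square root for the arguments that occur here (2 ≤ i ≤ 10000,
-- where the float computation is exact); bounded-search form so the kernel can reduce it.
def pvIsqrt (n : Nat) : Nat := ((List.range 101).filter (fun s => s * s ≤ n)).length - 1

-- 'for j in …: if i%j==0: break / else: append' = append iff no j in the range divides i
def qidPrimesA : List Int :=
  (PySem.List.pyRange 2 10001 1).foldl (fun primes i =>
    if (PySem.List.pyRange 2 ((pvIsqrt i.toNat : Int) + 1) 1).any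
        (fun j => PySem.Int.mod i j == 0)
    then primes else primes ++ [i]) []

-- primes[ord(x)-97] never raises on Dom_qid (index in [-88, 29], |idx| ≤ 1229 = len(primes)),
-- so the total pyGetD is exact here.
def qid (word : String) : Int :=
  let primes := qidPrimesA
  let prim_freq := word.toList.foldl (fun d x =>
      let k := PySem.List.pyGetD primes ((x.toNat : Int) - 97) 0
      if d.contains k then d.insert k (d.getD k 0 + 1) else d.insert k 1)
    (PySem.Dict.empty)
  prim_freq.items.foldl (fun val x => x.1 * x.2 + val) 0

-- ===== PORT B =====
def qidPrimesB : List Int :=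
  (PySem.List.pyRange 2 10001 1).filter (fun i =>
    i == 2 || (!(PySem.Int.mod i 2 == 0) &&
      (PySem.List.pyRange 3 ((pvIsqrt i.toNat : Int) + 1) 2).all
        (fun j => !(PySem.Int.mod i j == 0))))

def qid_alt (word : String) : Int :=
  (word.toList.map (fun x => PySem.List.pyGetD qidPrimesB ((x.toNat : Int) - 97) 0)).sum

-- ===== PRECONDITION & SPEC =====
def Spec_qid (word : String) (out : Int) : Prop := out = qid_alt word
instance (word : String) (out : Int) : Decidable (Spec_qid word out) := by unfold Spec_qid; infer_instance

-- ===== CLAIM (what is proved, stated in full; the proofs are below) =====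
def Claim_equal_qid : Prop := ∀ (word : String), Dom_qid word → Spec_qid word (qid word)

-- ===== LEMMAS AND PROOFS =====

lemma filter_range_sq (m n : Nat) :
    (List.range m).filter (fun s => s * s ≤ n) = List.range (min m (Nat.sqrt n + 1)) := by
  induction m with
  | zero => simp
  | succ m ih =>
    rw [List.range_succ, List.filter_append, ih]
    by_cases h : m * m ≤ n
    · have hm : m ≤ Nat.sqrt n := Nat.le_sqrt'.mpr (by rw [pow_two]; exact h)
      have : min (m + 1) (Nat.sqrt n + 1) = m + 1 := by omega
      rw [this]
      have : min m (Nat.sqrt n + 1) = m := by omega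
      rw [this, List.range_succ]
      simp [h]
    · have hm : Nat.sqrt n < m := by
        by_contra hc
        have := Nat.le_sqrt'.mp (show m ≤ Nat.sqrt n by omega)
        rw [pow_two] at this
        exact h this
      have h1 : min (m + 1) (Nat.sqrt n + 1) = Nat.sqrt n + 1 := by omega
      have h2 : min m (Nat.sqrt n + 1) = Nat.sqrt n + 1 := by omega
      rw [h1, h2]
      simp [h]

lemma pvIsqrt_eq (n : Nat) (h : n ≤ 10200) : pvIsqrt n = Nat.sqrt n := by
  have hs : Nat.sqrt n ≤ 100 := by
    have := Nat.sqrt_lt'.mpr (show n < 101 ^ 2 by rw [pow_two]; omega)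
    omega
  unfold pvIsqrt
  rw [filter_range_sq]
  have : min 101 (Nat.sqrt n + 1) = Nat.sqrt n + 1 := by omega
  rw [this, List.length_range]
  omega

lemma sqrt_two_aux : Nat.sqrt 2 = 1 := by
  have h1 : 1 ≤ Nat.sqrt 2 := Nat.le_sqrt'.mpr (by norm_num)
  have h2 : Nat.sqrt 2 < 2 := Nat.sqrt_lt'.mpr (by norm_num)
  omega

lemma primes_eq : qidPrimesA = qidPrimesB := by
  unfold qidPrimesA qidPrimesB
  have hshape : (fun (primes : List Int) i =>
      if (PySem.List.pyRange 2 ((pvIsqrt i.toNat : Int) + 1) 1).any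
          (fun j => PySem.Int.mod i j == 0)
      then primes else primes ++ [i])
      = (fun (primes : List Int) i =>
        if (!(PySem.List.pyRange 2 ((pvIsqrt i.toNat : Int) + 1) 1).any
            (fun j => PySem.Int.mod i j == 0)) = true
        then primes ++ [i] else primes) := by
    funext p i
    by_cases h : (PySem.List.pyRange 2 ((pvIsqrt i.toNat : Int) + 1) 1).any
        (fun j => PySem.Int.mod i j == 0) <;> simp [h]
  rw [hshape, PySem.List.foldl_append_if _ (fun i => i), List.nil_append, show (fun (i:Int) => i) = id from rfl, List.map_id]
  apply List.filter_congr
  intro i hi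
  have hib : (2:Int) ≤ i ∧ i < 10001 := PySem.List.mem_pyRange_one.mp hi
  have hle : i.toNat ≤ 10200 := by omega
  rw [pvIsqrt_eq i.toNat hle]
  have ht2 : (4:Int) ≤ i → 2 ≤ Nat.sqrt i.toNat := by
    intro h4
    exact Nat.le_sqrt'.mpr (by rw [pow_two]; omega)
  rw [Bool.eq_iff_iff]
  simp only [Bool.not_eq_true', List.any_eq_false, List.all_eq_true, Bool.or_eq_true,
    Bool.and_eq_true, beq_iff_eq, beq_eq_false_iff_ne, ne_eq, PySem.List.mem_pyRange_one,
    PySem.List.mem_pyRange_iff_of_pos (show (0:Int) < 2 by norm_num)]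
  constructor
  · intro hA
    by_cases h2 : i = 2
    · exact Or.inl h2
    · refine Or.inr ⟨?_, ?_⟩
      · -- i is odd: otherwise j = 2 would have been found by A's loop
        rw [PySem.Int.mod_eq_zero_iff_dvd]
        intro hdvd
        have h4 : (4:Int) ≤ i := by
          rcases hdvd with ⟨c, rfl⟩
          omega
        have h2s := ht2 h4
        have := hA 2 ⟨by omega, by omega⟩
        rw [PySem.Int.mod_eq_zero_iff_dvd] at this
        exact this hdvd
      · intro j hj
        exact hA j ⟨by omega, hj.2.1⟩
  · rintro (h2 | ⟨hodd, hall⟩) j hj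
    · subst h2
      rw [show Int.toNat 2 = 2 from rfl, sqrt_two_aux] at hj
      omega
    · rw [PySem.Int.mod_eq_zero_iff_dvd]
      intro hdvd
      rcases Int.even_or_odd j with ⟨c, hc⟩ | ⟨c, hc⟩
      · -- j even: then 2 divides i, contradicting hodd
        rw [PySem.Int.mod_eq_zero_iff_dvd] at hodd
        exact hodd (dvd_trans ⟨c, by omega⟩ hdvd)
      · -- j odd: hence j ≥ 3 and B's odd loop sees it
        have := hall j ⟨by omega, hj.2, ⟨c - 1, by omega⟩⟩
        rw [PySem.Int.mod_eq_zero_iff_dvd] at this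
        exact this hdvd

lemma sum_ite_self (l : List Int) (x : Int) (hnd : l.Nodup) (hx : x ∈ l) :
    (l.map (fun k => if k = x then k else (0:Int))).sum = x := by
  induction l with
  | nil => cases hx
  | cons a l ih =>
    simp only [List.map_cons, List.sum_cons]
    rcases List.mem_cons.mp hx with rfl | hx'
    · have hz : ∀ k ∈ l, (if k = x then k else (0:Int)) = 0 := by
        intro k hk
        have : k ≠ x := fun h => (List.nodup_cons.mp hnd).1 (h ▸ hk)
        simp [this]
      rw [if_pos rfl, List.map_congr_left hz]
      simp
    · have hne : a ≠ x := fun h => (List.nodup_cons.mp hnd).1 (h ▸ hx')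
      rw [if_neg hne, ih (List.nodup_cons.mp hnd).2 hx']
      ring

lemma sum_mul_count (ks l : List Int) (hnd : l.Nodup) (hsub : ∀ x ∈ ks, x ∈ l) :
    (l.map (fun k => k * (ks.count k : Int))).sum = ks.sum := by
  induction ks with
  | nil => simp
  | cons x ks ih =>
    have hx : x ∈ l := hsub x List.mem_cons_self
    have hstep : ∀ k, k * (((x :: ks).count k : Nat) : Int)
        = k * ((ks.count k : Nat) : Int) + (if k = x then k else 0) := by
      intro k
      rw [List.count_cons]
      by_cases h : k = x
      · simp [h]; ring
      · have h' : ¬ x = k := fun e => h e.symm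
        simp [h, h']
    calc (l.map (fun k => k * (((x :: ks).count k : Nat) : Int))).sum
        = (l.map (fun k => k * ((ks.count k : Nat) : Int) + (if k = x then k else 0))).sum := by
          exact congrArg List.sum (List.map_congr_left (fun k _ => hstep k))
      _ = (l.map (fun k => k * ((ks.count k : Nat) : Int))).sum
          + (l.map (fun k => if k = x then k else (0:Int))).sum := by
          rw [← List.sum_map_add]
      _ = ks.sum + x := by
          rw [ih (fun y hy => hsub y (List.mem_cons_of_mem _ hy)), sum_ite_self l x hnd hx]
      _ = (x :: ks).sum := by simp; ring

-- ===== VERDICT (by name: the statement is the Claim_ definition above) =====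
theorem qid_spec : Claim_equal_qid := by
  intro word _
  unfold Spec_qid qid qid_alt
  rw [← primes_eq]
  set f : Char → Int := fun x => PySem.List.pyGetD qidPrimesA ((x.toNat : Int) - 97) 0 with hf
  have hloop : (fun (d : PySem.Dict Int Int) (x : Char) =>
      let k := f x
      if d.contains k then d.insert k (d.getD k 0 + 1) else d.insert k 1)
      = (fun d x => d.insert (f x) (d.getD (f x) 0 + 1)) := by
    funext d x
    by_cases h : d.contains (f x)
    · simp [h]
    · have hb : d.contains (f x) = false := by
        cases hcb : d.contains (f x)
        · rfl
        · exact absurd hcb h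
      have hg : d.getD (f x) 0 = 0 := by
        have hiso := PySem.Dict.contains_eq_isSome_get? d (f x)
        rw [hb] at hiso
        cases hq : (d.get? (f x)) with
        | none => simp [PySem.Dict.getD, hq]
        | some v => rw [hq] at hiso; simp at hiso
      simp [h, hg]
  simp only []
  rw [hloop]
  have hc : List.foldl (fun (d : PySem.Dict Int Int) x => d.insert (f x) (d.getD (f x) 0 + 1))
      PySem.Dict.empty word.toList = PySem.Dict.counter (word.toList.map f) := by
    rw [← PySem.Dict.foldl_insert_getD_add_one_eq_counter, List.foldl_map]
  rw [hc, PySem.Dict.items_counter]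
  set ks : List Int := word.toList.map f with hks
  have hsum : (fun (val : Int) (x : Int × Int) => x.1 * x.2 + val)
      = (fun val x => val + (fun (p : Int × Int) => p.1 * p.2) x) := by
    funext v p
    exact add_comm _ _
  rw [hsum, PySem.List.foldl_add, List.map_map, zero_add]
  have : ((fun (p : Int × Int) => p.1 * p.2) ∘ fun k => (k, (ks.count k : Int)))
      = fun k => k * (ks.count k : Int) := rfl
  rw [this, sum_mul_count ks (PySem.Set.ofList ks) (PySem.Set.nodup_ofList ks)
    (fun x hx => (PySem.Set.mem_ofList ks x).mpr hx)]
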